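-- pv_equiv track=rewrite | github.com/MrBrantCode/unitest_baseline | mut_generate/mist_train_cf/cf_71414/solution.py | capitalize_chars
-- ===== SOURCE A (Python) =====
-- def capitalize_chars(text, n):
--     words = text.split()
--     new_words = []
--
--     for word in words:
--         if len(word) < n:
--             return "Error: The word '{}' has characters less than specified number!".format(word)
--
--         new_word = word[:n].upper() + word[n:]
--         new_words.append(new_word)
--
--     return ' '.join(new_words)
-- ===== SOURCE B (Python) =====
-- def capitalize_chars(text, n):
--     words = text.split()
--     bad = next((w for w in words if len(w) < n), None)
--     if bad is not None:
--         return "Error: The word '{}' has characters less than specified number!".format(bad)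
--     return ' '.join(w[:n].upper() + w[n:] for w in words)
-- ===== Notes on version B (the rewrite author's own statement) =====
-- stated objective: simpler
-- what changed: Replaces the interleaved validate-and-build accumulator loop with two separate phases: a scan for the first too-short word (early error), then a single join over a transform comprehension.
import Mathlib
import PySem

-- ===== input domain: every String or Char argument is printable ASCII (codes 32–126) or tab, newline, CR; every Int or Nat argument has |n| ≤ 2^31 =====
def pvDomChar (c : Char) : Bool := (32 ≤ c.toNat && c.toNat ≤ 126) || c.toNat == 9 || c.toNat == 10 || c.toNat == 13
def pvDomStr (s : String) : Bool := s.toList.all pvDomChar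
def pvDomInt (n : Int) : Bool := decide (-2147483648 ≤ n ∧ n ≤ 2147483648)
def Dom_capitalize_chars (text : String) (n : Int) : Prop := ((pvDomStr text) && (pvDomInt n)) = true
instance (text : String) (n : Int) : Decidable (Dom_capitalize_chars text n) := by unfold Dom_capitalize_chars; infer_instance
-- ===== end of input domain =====

-- B replaces A's interleaved validate-and-build loop by a separate validation scan
-- followed by a map-and-join transform; same cost, simpler decomposition.

-- shared literal pieces (the error message and the per-word transform are the same text in both Pythons)
def pvErrMsg (w : String) : String :=
  "Error: The word '" ++ w ++ "' has characters less than specified number!"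

def pvTransform (n : Int) (w : String) : String :=
  PySem.Str.upper (PySem.Str.slice w none (some n)) ++ PySem.Str.slice w (some n) none

-- ===== PORT A =====
-- A's for-loop with early return, as structural recursion carrying the accumulator new_words
def capAList (n : Int) (acc : List String) : List String → String
  | [] => PySem.Str.join " " acc
  | w :: ws =>
    if PySem.Str.len w < n then pvErrMsg w
    else capAList n (acc ++ [pvTransform n w]) ws

def capitalize_chars (text : String) (n : Int) : String :=
  capAList n [] (PySem.Str.split₀ text)

-- ===== PORT B =====
def capitalize_chars_alt (text : String) (n : Int) : String :=
  let words := PySem.Str.split₀ text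
  match words.find? (fun w => decide (PySem.Str.len w < n)) with
  | some bad => pvErrMsg bad
  | none => PySem.Str.join " " (words.map (pvTransform n))

-- ===== PRECONDITION & SPEC =====
def Spec_capitalize_chars (text : String) (n : Int) (out : String) : Prop := out = capitalize_chars_alt text n
instance (text : String) (n : Int) (out : String) : Decidable (Spec_capitalize_chars text n out) := by unfold Spec_capitalize_chars; infer_instance

-- ===== CLAIM (what is proved, stated in full; the proofs are below) =====
def Claim_equal_capitalize_chars : Prop := ∀ (text : String) (n : Int), Dom_capitalize_chars text n → Spec_capitalize_chars text n (capitalize_chars text n)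

-- ===== LEMMAS AND PROOFS =====

lemma capAList_eq (n : Int) (ws : List String) : ∀ (acc : List String),
    capAList n acc ws =
      match ws.find? (fun w => decide (PySem.Str.len w < n)) with
      | some bad => pvErrMsg bad
      | none => PySem.Str.join " " (acc ++ ws.map (pvTransform n)) := by
  induction ws with
  | nil => intro acc; simp [capAList]
  | cons w ws ih =>
    intro acc
    by_cases h : (w.length : Int) < n
    · simp [capAList, PySem.Str.len, h, List.find?]
    · simp [capAList, PySem.Str.len, h, List.find?, ih, List.append_assoc]

-- ===== VERDICT (by name: the statement is the Claim_ definition above) =====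
theorem capitalize_chars_spec : Claim_equal_capitalize_chars := by
  intro text n _
  unfold Spec_capitalize_chars capitalize_chars capitalize_chars_alt
  rw [capAList_eq]
  simp
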